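-- pv_equiv track=rewrite | github.com/zoomoid/mockerell | pymocklib/helpers.py | alternating_mask_iterator
-- ===== SOURCE A (Python) =====
-- def alternating_mask_iterator(n: int | None = None):
--     """
--     Creates an iterator that returns alternating booleans,
--     either n times or infinite, if not specified
--     """
--     v = False
--     i = 0
--     while True:
--         if n != None and i >= n:
--             break
--         yield v
--         v = not v
--         i += 1
-- ===== SOURCE B (Python) =====
-- def alternating_mask_iterator(n: int | None = None):
--     """
--     Yields alternating booleans (False first), n times or forever if n is None.
--     Tiles the fixed two-element pattern (False, True) instead of toggling state:
--     the finite case materialises ceil(n/2) copies and truncates to n,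
--     the infinite case replays the pattern forever.
--     """
--     pattern = (False, True)
--     if n is None:
--         while True:
--             yield from pattern
--     else:
--         yield from (list(pattern) * ((n + 1) // 2))[:n]
-- ===== Notes on version B (the rewrite author's own statement) =====
-- stated objective: alternative
-- what changed: Replaces the per-step toggled boolean and while/break counter by tiling: build ceil(n/2) copies of the fixed pattern (False, True) and truncate the tiled list to n (replay the pattern forever when n is None); no per-element state is maintained.
import Mathlib
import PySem

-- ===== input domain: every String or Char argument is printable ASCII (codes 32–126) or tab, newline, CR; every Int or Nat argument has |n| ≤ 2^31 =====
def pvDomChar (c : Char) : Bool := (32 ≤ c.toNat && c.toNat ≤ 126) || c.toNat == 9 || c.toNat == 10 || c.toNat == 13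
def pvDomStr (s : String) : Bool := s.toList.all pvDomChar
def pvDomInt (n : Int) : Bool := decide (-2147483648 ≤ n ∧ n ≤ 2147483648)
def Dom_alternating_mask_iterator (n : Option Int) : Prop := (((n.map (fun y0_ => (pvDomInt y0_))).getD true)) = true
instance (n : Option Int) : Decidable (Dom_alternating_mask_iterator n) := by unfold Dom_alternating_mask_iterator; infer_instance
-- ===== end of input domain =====

-- B tiles the fixed pattern [False, True] ceil(n/2) times and truncates to n, instead of
-- A's toggled boolean and while/break counter (objective: alternative, same cost).

-- ===== PORT A =====
-- A's while-True loop with toggled boolean v and counter i; for n = some m it runs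
-- exactly m.toNat iterations (break when i >= m), transcribed as fuel recursion.
def pvALoop : Nat → Bool → List Bool
  | 0, _ => []
  | k+1, v => v :: pvALoop k (!v)

def alternating_mask_iterator (n : Option Int) : List Bool :=
  match n with
  | none => []        -- n = None: the Python generator is infinite; excluded by Pre_
  | some m => pvALoop m.toNat false

-- ===== PORT B =====
-- list(pattern) * ((n + 1) // 2), then sliced [:n]; Python list repetition repeats
-- max(k, 0) times, which is Int.toNat of the floordiv.
def alternating_mask_iterator_alt (n : Option Int) : List Bool :=
  match n with
  | none => []        -- n = None: infinite in Python; excluded by Pre_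
  | some m =>
    let pattern : List Bool := [false, true]
    PySem.List.slice (List.flatten (List.replicate (PySem.Int.floordiv (m + 1) 2).toNat pattern))
      none (some m)

-- ===== PRECONDITION & SPEC =====
-- Pre_ excludes n = None, on which the Python generator is infinite (A never returns a finite list).
def Pre_alternating_mask_iterator (n : Option Int) : Prop := n ≠ none
instance (n : Option Int) : Decidable (Pre_alternating_mask_iterator n) := by unfold Pre_alternating_mask_iterator; infer_instance
def pvWitness_alternating_mask_iterator : Option Int := (some 5)

def Spec_alternating_mask_iterator (n : Option Int) (out : List Bool) : Prop := out = alternating_mask_iterator_alt n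
instance (n : Option Int) (out : List Bool) : Decidable (Spec_alternating_mask_iterator n out) := by unfold Spec_alternating_mask_iterator; infer_instance

-- ===== CLAIM (what is proved, stated in full; the proofs are below) =====
def Claim_equal_alternating_mask_iterator : Prop := ∀ (n : Option Int), Dom_alternating_mask_iterator n → Pre_alternating_mask_iterator n → Spec_alternating_mask_iterator n (alternating_mask_iterator n)

-- ===== LEMMAS AND PROOFS =====
-- A's loop, started at False, takes any prefix of the tiled pattern.
theorem pvALoop_eq_take_tile (m j : Nat) (h : m ≤ 2 * j) :
    pvALoop m false = (List.flatten (List.replicate j [false, true])).take m := by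
  induction j generalizing m with
  | zero =>
    have : m = 0 := by omega
    subst this; rfl
  | succ j ih =>
    match m, h with
    | 0, _ => rfl
    | 1, _ => simp [pvALoop, List.replicate_succ]
    | (m+2), h =>
      have hm : m ≤ 2 * j := by omega
      simp only [List.replicate_succ, List.flatten_cons]
      show false :: true :: pvALoop m false = _
      rw [ih m hm]
      rfl

theorem alternating_mask_iterator_spec : Claim_equal_alternating_mask_iterator := by
  intro n _ hpre
  unfold Spec_alternating_mask_iterator alternating_mask_iterator alternating_mask_iterator_alt
  match n with
  | none => exact absurd rfl hpre
  | some m =>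
    simp only
    by_cases hm : 0 ≤ m
    · -- m ≥ 0: slice [:m] is take m.toNat; m.toNat ≤ 2 * ceil(m/2)
      have hfd : PySem.Int.floordiv (m + 1) 2 = (m + 1) / 2 :=
        PySem.Int.floordiv_eq_ediv_of_pos (by omega)
      have hcast : (m.toNat : Int) = m := Int.toNat_of_nonneg hm
      have hslice : PySem.List.slice
          (List.flatten (List.replicate ((PySem.Int.floordiv (m + 1) 2)).toNat [false, true]))
          none (some m)
          = (List.flatten (List.replicate ((PySem.Int.floordiv (m + 1) 2)).toNat [false, true])).take m.toNat := by
        rw [← hcast]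
        exact PySem.List.slice_to_natCast _ _
      rw [hslice, pvALoop_eq_take_tile m.toNat ((PySem.Int.floordiv (m + 1) 2)).toNat (by omega)]
    · -- m < 0: A's loop runs 0 times; B's tiled list is empty (multiplier ≤ 0)
      have h1 : m.toNat = 0 := by omega
      have h2 : (PySem.Int.floordiv (m + 1) 2).toNat = 0 := by
        have := PySem.Int.floordiv_mul_add_mod (m + 1) 2
        have hmod : 0 ≤ PySem.Int.mod (m + 1) 2 ∧ PySem.Int.mod (m + 1) 2 < 2 := by
          constructor
          · have := PySem.Int.mod_eq_emod_of_pos (a := m + 1) (b := 2) (by omega)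
            rw [this]; omega
          · have := PySem.Int.mod_eq_emod_of_pos (a := m + 1) (b := 2) (by omega)
            rw [this]; omega
        omega
      rw [h1, h2]
      simp [pvALoop, PySem.List.slice]
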